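-- pv_equiv track=rewrite | github.com/khopilot/ocr-training-km | eval/cer.py | confusion_matrix_chars
-- ===== SOURCE A (Python) =====
-- from typing import List, Tuple, Dict, Optional, Set
--
-- def confusion_matrix_chars(
--     references: List[str],
--     hypotheses: List[str],
--     charset: Optional[str] = None
-- ) -> Dict[str, Dict[str, int]]:
--     """
--     Build character-level confusion matrix
--
--     Args:
--         references: List of ground truth texts
--         hypotheses: List of predicted texts
--         charset: Optional character set to consider
--
--     Returns:
--         Confusion matrix as nested dictionary
--     """
--     matrix = {}
--
--     for ref, hyp in zip(references, hypotheses):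
--         for i in range(min(len(ref), len(hyp))):
--             ref_char = ref[i]
--             hyp_char = hyp[i]
--
--             if charset and (ref_char not in charset or hyp_char not in charset):
--                 continue
--
--             if ref_char not in matrix:
--                 matrix[ref_char] = {}
--
--             if hyp_char not in matrix[ref_char]:
--                 matrix[ref_char][hyp_char] = 0
--
--             matrix[ref_char][hyp_char] += 1
--
--     return matrix
-- ===== SOURCE B (Python) =====
-- from collections import Counter
--
--
-- def confusion_matrix_chars(references, hypotheses, charset=None):
--     # Phase 1: collect all kept (ref_char, hyp_char) pairs in one flat list.
--     pairs = [
--         (rc, hc)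
--         for ref, hyp in zip(references, hypotheses)
--         for rc, hc in zip(ref, hyp)
--         if not (charset and (rc not in charset or hc not in charset))
--     ]
--     # Phase 2: group by ref char (first-encounter order), count hyp chars per group.
--     return {
--         rc: dict(Counter(h for r, h in pairs if r == rc))
--         for rc in dict.fromkeys(r for r, _ in pairs)
--     }
-- ===== Notes on version B (the rewrite author's own statement) =====
-- stated objective: alternative
-- what changed: A grows a nested dict incrementally inside one pass over the char pairs; B first collects the kept (ref_char, hyp_char) pairs into one flat list, then builds the matrix row by row via dict.fromkeys ordered dedup of ref chars and a per-row Counter over the pairs.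
import Mathlib
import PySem

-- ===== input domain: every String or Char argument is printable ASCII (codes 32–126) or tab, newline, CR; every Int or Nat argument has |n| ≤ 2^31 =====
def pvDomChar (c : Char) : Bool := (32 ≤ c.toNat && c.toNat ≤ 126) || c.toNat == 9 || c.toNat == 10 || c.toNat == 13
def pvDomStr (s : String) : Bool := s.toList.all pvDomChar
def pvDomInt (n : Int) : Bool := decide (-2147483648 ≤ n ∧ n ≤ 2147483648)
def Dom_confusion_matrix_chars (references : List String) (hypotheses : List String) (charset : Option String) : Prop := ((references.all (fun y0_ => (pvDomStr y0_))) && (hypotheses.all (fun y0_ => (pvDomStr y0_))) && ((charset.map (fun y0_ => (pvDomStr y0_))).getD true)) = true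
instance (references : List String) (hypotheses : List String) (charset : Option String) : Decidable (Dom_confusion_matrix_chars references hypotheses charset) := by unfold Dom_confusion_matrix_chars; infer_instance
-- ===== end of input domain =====

-- B re-groups A's single incremental nested-dict loop into two phases: collect the kept
-- (ref_char, hyp_char) pairs flat, then build each row by grouping/counting; same result, alternative structure.

-- ===== PORT A =====
-- `for i in range(min(len(ref), len(hyp))): ref_char = ref[i]; hyp_char = hyp[i]` is ported as a fold
-- over `ref.toList.zip hyp.toList` (exact: it visits exactly the index pairs 0..min-1 in order).
-- `ref_char not in charset` on a 1-character string is exactly char membership in charset's characters;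
-- `if charset and …` is false for charset = None and for the empty string (Python truthiness).
def confusion_matrix_chars (references : List String) (hypotheses : List String) (charset : Option String) : List (String × List (String × Int)) :=
  let matrix : PySem.Dict String (PySem.Dict String Int) :=
    (references.zip hypotheses).foldl (fun matrix rh =>
      (rh.1.toList.zip rh.2.toList).foldl (fun matrix p =>
        if (match charset with
            | none => false
            | some s => !s.toList.isEmpty && (!(s.toList.contains p.1) || !(s.toList.contains p.2))) then
          matrix  -- continue
        else
          let ref_char := String.ofList [p.1]
          let hyp_char := String.ofList [p.2]
          let m1 := if matrix.contains ref_char then matrix else matrix.insert ref_char PySem.Dict.empty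
          let inner := m1.getD ref_char PySem.Dict.empty
          let inner1 := if inner.contains hyp_char then inner else inner.insert hyp_char (0 : Int)
          m1.insert ref_char (inner1.insert hyp_char (inner1.getD hyp_char 0 + 1))) matrix)
      PySem.Dict.empty
  matrix.items.map (fun q => (q.1, q.2.items))

-- ===== PORT B =====
-- the pairs list comprehension is the flatMap/filter/map below; `dict.fromkeys` is PySem.List.dedup;
-- `dict(Counter(…))` has the Counter's items; the dict comprehension's items, in key order, are this map.
def confusion_matrix_chars_alt (references : List String) (hypotheses : List String) (charset : Option String) : List (String × List (String × Int)) :=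
  let pairs : List (String × String) :=
    (references.zip hypotheses).flatMap (fun rh =>
      ((rh.1.toList.zip rh.2.toList).filter (fun p =>
        !(match charset with
          | none => false
          | some s => !s.toList.isEmpty && (!(s.toList.contains p.1) || !(s.toList.contains p.2))))).map
        (fun p => (String.ofList [p.1], String.ofList [p.2])))
  (PySem.List.dedup (pairs.map Prod.fst)).map (fun rc =>
    (rc, (PySem.Dict.counter ((pairs.filter (fun q => q.1 == rc)).map Prod.snd)).items))

-- ===== PRECONDITION & SPEC =====
def Spec_confusion_matrix_chars (references : List String) (hypotheses : List String) (charset : Option String) (out : List (String × List (String × Int))) : Prop := out = confusion_matrix_chars_alt references hypotheses charset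
instance (references : List String) (hypotheses : List String) (charset : Option String) (out : List (String × List (String × Int))) : Decidable (Spec_confusion_matrix_chars references hypotheses charset out) := by unfold Spec_confusion_matrix_chars; infer_instance

-- ===== CLAIM (what is proved, stated in full; the proofs are below) =====
def Claim_equal_confusion_matrix_chars : Prop := ∀ (references : List String) (hypotheses : List String) (charset : Option String), Dom_confusion_matrix_chars references hypotheses charset → Spec_confusion_matrix_chars references hypotheses charset (confusion_matrix_chars references hypotheses charset)

-- ===== LEMMAS AND PROOFS =====

-- the guard of both ports, named for the proofs
def pvGuard (charset : Option String) (p : Char × Char) : Bool :=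
  match charset with
  | none => false
  | some s => !s.toList.isEmpty && (!(s.toList.contains p.1) || !(s.toList.contains p.2))

-- A's per-pair update, on String keys
def pvBump (m : PySem.Dict String (PySem.Dict String Int)) (q : String × String) : PySem.Dict String (PySem.Dict String Int) :=
  let m1 := if m.contains q.1 then m else m.insert q.1 PySem.Dict.empty
  let inner := m1.getD q.1 PySem.Dict.empty
  let inner1 := if inner.contains q.2 then inner else inner.insert q.2 (0 : Int)
  m1.insert q.1 (inner1.insert q.2 (inner1.getD q.2 0 + 1))

theorem pvBump_eq (m : PySem.Dict String (PySem.Dict String Int)) (q : String × String) :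
    pvBump m q = m.insert q.1 ((m.getD q.1 PySem.Dict.empty).modify q.2 0 (· + 1)) := by
  unfold pvBump PySem.Dict.modify
  by_cases h : m.contains q.1 = true
  · simp only [h, if_true]
    by_cases h2 : (m.getD q.1 PySem.Dict.empty).contains q.2 = true
    · simp [h2]
    · simp only [Bool.not_eq_true] at h2
      simp [h2, PySem.Dict.insert_insert_self, PySem.Dict.getD_insert_self,
        PySem.Dict.getD_of_not_contains _ _ h2]
  · simp only [Bool.not_eq_true] at h
    simp only [h, if_false, PySem.Dict.getD_insert_self, PySem.Dict.insert_insert_self,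
      PySem.Dict.getD_of_not_contains _ _ h]
    simp [PySem.Dict.contains_empty, PySem.Dict.getD_insert_self, PySem.Dict.getD_empty,
      PySem.Dict.insert_insert_self]

-- A's nested loop is the fold of pvBump over B's flat pairs list
theorem pvA_fold_eq (L : List (String × String)) (cs : Option String)
    (init : PySem.Dict String (PySem.Dict String Int)) :
    L.foldl (fun matrix rh =>
      (rh.1.toList.zip rh.2.toList).foldl (fun matrix p =>
        if pvGuard cs p then matrix
        else pvBump matrix (String.ofList [p.1], String.ofList [p.2])) matrix) init
    = (L.flatMap (fun rh =>
        ((rh.1.toList.zip rh.2.toList).filter (fun p => !(pvGuard cs p))).map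
          (fun p => (String.ofList [p.1], String.ofList [p.2])))).foldl pvBump init := by
  induction L generalizing init with
  | nil => rfl
  | cons rh t ih =>
    simp only [List.foldl_cons, List.flatMap_cons, List.foldl_append, ih]
    congr 1
    rw [List.foldl_map, List.foldl_filter]
    congr 1
    funext m p
    by_cases h : pvGuard cs p <;> simp [h]

theorem pvGetD_fold (kps : List (String × String)) (d : PySem.Dict String (PySem.Dict String Int)) (rc : String) :
    (kps.foldl pvBump d).getD rc PySem.Dict.empty
    = ((kps.filter (fun q => q.1 == rc)).map Prod.snd).foldl
        (fun inn hc => inn.modify hc 0 (· + 1)) (d.getD rc PySem.Dict.empty) := by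
  induction kps generalizing d with
  | nil => rfl
  | cons q t ih =>
    simp only [List.foldl_cons, ih, pvBump_eq]
    by_cases h : q.1 = rc
    · subst h
      simp [PySem.Dict.getD_insert_self]
    · have h' : rc ≠ q.1 := fun e => h e.symm
      simp [h, PySem.Dict.getD_insert_of_ne _ _ _ h']

-- the canonical shape of A's fold result
theorem pvMain (kps : List (String × String)) :
    (kps.foldl pvBump PySem.Dict.empty).items.map (fun q => (q.1, q.2.items))
    = (PySem.Set.ofList (kps.map Prod.fst)).map (fun rc =>
        (rc, (PySem.Dict.counter ((kps.filter (fun q => q.1 == rc)).map Prod.snd)).items)) := by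
  have hN : ∀ rc, (kps.foldl pvBump PySem.Dict.empty).getD rc PySem.Dict.empty
      = PySem.Dict.counter ((kps.filter (fun q => q.1 == rc)).map Prod.snd) := by
    intro rc
    rw [pvGetD_fold, PySem.Dict.getD_empty, PySem.Dict.counter_eq_foldl]
  have hb : pvBump = fun m q => m.insert q.1 ((m.getD q.1 PySem.Dict.empty).modify q.2 0 (· + 1)) := by
    funext m q; exact pvBump_eq m q
  have hnd : (kps.foldl pvBump PySem.Dict.empty).keys.Nodup := by
    rw [hb]; exact PySem.Dict.nodup_keys_foldl_insert_key kps Prod.fst _ _ PySem.Dict.nodup_keys_empty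
  have hk : (kps.foldl pvBump PySem.Dict.empty).keys = PySem.Set.ofList (kps.map Prod.fst) := by
    rw [hb, PySem.Dict.keys_foldl_insert_key, PySem.Dict.keys_empty]; rfl
  rw [PySem.Dict.items_eq_map_keys _ hnd PySem.Dict.empty, List.map_map, hk]
  congr 1
  funext rc
  simp [hN rc]

-- ===== VERDICT (by name: the statement is the Claim_ definition above) =====
theorem confusion_matrix_chars_spec : Claim_equal_confusion_matrix_chars := by
  intro references hypotheses charset _
  show confusion_matrix_chars references hypotheses charset
      = confusion_matrix_chars_alt references hypotheses charset
  have h := congrArg (fun m : PySem.Dict String (PySem.Dict String Int) =>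
      m.items.map (fun q => (q.1, q.2.items)))
    (pvA_fold_eq (references.zip hypotheses) charset PySem.Dict.empty)
  exact h.trans (pvMain _)
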